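-- pv_equiv track=rewrite | github.com/grapl-security/grapl | etc/local_grapl/beaconing_tcp/main.py | diff_timestamps
-- ===== SOURCE A (Python) =====
-- def diff_timestamps(timestamps: [int]) -> [int]:
--     diffs = []
--     timestamp_iter = iter(timestamps)
--     for timestamp_a in timestamp_iter:
--         try:
--             timestamp_b = next(timestamp_iter)
--         except StopIteration:
--             break
--         diffs.append(timestamp_a - timestamp_b)
--     return diffs
-- ===== SOURCE B (Python) =====
-- def diff_timestamps(timestamps: [int]) -> [int]:
--     return [a - b for a, b in zip(timestamps[::2], timestamps[1::2])]
-- ===== Notes on version B (the rewrite author's own statement) =====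
-- stated objective: idiomatic
-- what changed: Replaces the manual iterator driving with next()/StopIteration by slicing the even- and odd-indexed subsequences and subtracting them pairwise with zip, which truncates a trailing unpaired element naturally.
import Mathlib
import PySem

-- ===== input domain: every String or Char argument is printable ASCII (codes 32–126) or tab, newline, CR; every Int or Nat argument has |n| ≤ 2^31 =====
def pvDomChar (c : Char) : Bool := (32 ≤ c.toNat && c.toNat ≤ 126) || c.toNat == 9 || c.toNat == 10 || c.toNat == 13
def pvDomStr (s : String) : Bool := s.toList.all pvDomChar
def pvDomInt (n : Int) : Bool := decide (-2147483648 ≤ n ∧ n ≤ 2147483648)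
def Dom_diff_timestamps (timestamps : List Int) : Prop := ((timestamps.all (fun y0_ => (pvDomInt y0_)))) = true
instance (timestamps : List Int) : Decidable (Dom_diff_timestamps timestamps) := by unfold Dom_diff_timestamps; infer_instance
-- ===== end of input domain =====

-- B replaces A's manual iterator/StopIteration loop with slice-the-evens/odds + zip subtraction (idiomatic).


-- ===== PORT A =====
-- Port of A: the loop takes two elements per iteration (timestamp_a, then next();
-- StopIteration on an unpaired trailing element breaks out) and appends a - b.
def diff_timestamps (timestamps : List Int) : List Int :=
  match timestamps with
  | a :: b :: rest => (a - b) :: diff_timestamps rest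
  | _ => []

-- ===== PORT B =====
-- step-2 slicing xs[i::2] has no PySem primitive; ported by hand, exact for step 2:
-- every other element starting from the head.
def strideTwo (xs : List Int) : List Int :=
  match xs with
  | [] => []
  | [a] => [a]
  | a :: _ :: rest => a :: strideTwo rest

-- Port of B: zip(timestamps[::2], timestamps[1::2]) and subtract pairwise
-- (zipWith truncates to the shorter list, exactly like Python's zip).
def diff_timestamps_alt (timestamps : List Int) : List Int :=
  List.zipWith (fun a b => a - b) (strideTwo timestamps) (strideTwo timestamps.tail)

-- ===== PRECONDITION & SPEC =====
def Spec_diff_timestamps (timestamps : List Int) (out : List Int) : Prop := out = diff_timestamps_alt timestamps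
instance (timestamps : List Int) (out : List Int) : Decidable (Spec_diff_timestamps timestamps out) := by unfold Spec_diff_timestamps; infer_instance

-- ===== CLAIM (what is proved, stated in full; the proofs are below) =====
def Claim_equal_diff_timestamps : Prop := ∀ (timestamps : List Int), Dom_diff_timestamps timestamps → Spec_diff_timestamps timestamps (diff_timestamps timestamps)

-- ===== LEMMAS AND PROOFS =====

theorem strideTwo_cons (b : Int) (rest : List Int) :
    strideTwo (b :: rest) = b :: strideTwo rest.tail := by
  cases rest <;> simp [strideTwo]

theorem ab_eq (timestamps : List Int) :
    diff_timestamps timestamps = diff_timestamps_alt timestamps := by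
  fun_induction diff_timestamps timestamps with
  | case1 a b rest ih =>
    simp only [diff_timestamps_alt] at ih ⊢
    simp [strideTwo, strideTwo_cons, ih]
  | case2 xs h =>
    cases xs with
    | nil => rfl
    | cons a t =>
      cases t with
      | nil => rfl
      | cons b r => exact absurd rfl (h a b r)

-- ===== VERDICT =====
theorem diff_timestamps_spec : Claim_equal_diff_timestamps := by
  intro ts _
  unfold Spec_diff_timestamps
  exact ab_eq ts
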